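-- pv_equiv track=rewrite | github.com/leeao/MortalKombat | fmt_RenderWare_MortalKombat_PS2_PSP.py | getAnimBoneMap
-- ===== SOURCE A (Python) =====
-- def getAnimBoneMap(hAnimBoneIDList,hSkinBoneIDList):
--     boneMap = []
--     for i in range(26):
--         animBoneID = 4096 + i
--         for j in range(len(hAnimBoneIDList)):
--             if hAnimBoneIDList[j] & 0xFFFF == animBoneID:
--                 boneMap.append(hSkinBoneIDList[j])
--                 break
--     return boneMap
-- ===== SOURCE B (Python) =====
-- def getAnimBoneMap(hAnimBoneIDList, hSkinBoneIDList):
--     MISSING = object()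
--     slots = [MISSING] * 26
--     for j in range(len(hAnimBoneIDList)):
--         m = hAnimBoneIDList[j] & 0xFFFF
--         if 4096 <= m <= 4121 and slots[m - 4096] is MISSING:
--             slots[m - 4096] = hSkinBoneIDList[j]
--     return [v for v in slots if v is not MISSING]
-- ===== Notes on version B (the rewrite author's own statement) =====
-- stated objective: faster
-- what changed: Replaces 26 repeated scans of the anim list (one per bone ID) by a single scatter pass that writes each skin ID into its slot on first occurrence, followed by a fixed gather over the 26 slots.
import Mathlib
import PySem

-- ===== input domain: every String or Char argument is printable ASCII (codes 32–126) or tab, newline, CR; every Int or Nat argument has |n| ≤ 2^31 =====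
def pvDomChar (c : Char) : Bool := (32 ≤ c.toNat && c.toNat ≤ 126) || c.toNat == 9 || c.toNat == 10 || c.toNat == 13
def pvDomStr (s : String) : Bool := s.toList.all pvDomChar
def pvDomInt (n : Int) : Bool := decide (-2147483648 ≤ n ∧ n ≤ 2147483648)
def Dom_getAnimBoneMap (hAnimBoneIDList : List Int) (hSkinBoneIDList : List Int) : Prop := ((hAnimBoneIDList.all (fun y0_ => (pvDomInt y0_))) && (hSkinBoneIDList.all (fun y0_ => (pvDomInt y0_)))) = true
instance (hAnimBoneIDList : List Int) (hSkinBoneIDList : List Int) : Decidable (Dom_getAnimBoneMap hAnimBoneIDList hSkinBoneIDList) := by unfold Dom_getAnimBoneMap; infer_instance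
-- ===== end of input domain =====

-- B replaces A's 26 repeated scans by one scatter pass into 26 slots plus a fixed gather (faster by a constant factor).

-- x & 0xFFFF on a Python int = floor-mod by 65536 (exact, also for negative x)
def pvMask (x : Int) : Int := PySem.Int.mod x 65536

-- ===== PORT A =====
-- A's inner loop: scan j upward, return skin[j] at the first j with mask = v (break).
-- skin[j] is ported as pyGetD skin j 0: exact where Python returns; the IndexError case is excluded by Pre_.
def pvInnerA (skin : List Int) (v : Int) : List (Int × Int) → Option Int
  | [] => none
  | (j, a) :: rest => if pvMask a = v then some (PySem.List.pyGetD skin j 0) else pvInnerA skin v rest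

def getAnimBoneMap (hAnimBoneIDList : List Int) (hSkinBoneIDList : List Int) : List Int :=
  (List.range 26).foldl (fun (boneMap : List Int) (i : Nat) =>
    match pvInnerA hSkinBoneIDList (4096 + (i : Int)) (PySem.List.enumerate hAnimBoneIDList) with
    | some s => boneMap ++ [s]
    | none => boneMap) []

-- ===== PORT B =====
-- B's scatter pass: slots of Option Int (none = MISSING); write skin[j] only when the slot is still empty.
def pvScatter (skin : List Int) : List (Option Int) → List (Int × Int) → List (Option Int)
  | slots, [] => slots
  | slots, (j, a) :: rest =>
      let m := pvMask a
      if 4096 ≤ m ∧ m ≤ 4121 ∧ slots.getD (m - 4096).toNat none = none then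
        pvScatter skin (slots.set (m - 4096).toNat (some (PySem.List.pyGetD skin j 0))) rest
      else
        pvScatter skin slots rest

def getAnimBoneMap_alt (hAnimBoneIDList : List Int) (hSkinBoneIDList : List Int) : List Int :=
  (pvScatter hSkinBoneIDList (List.replicate 26 none) (PySem.List.enumerate hAnimBoneIDList)).filterMap id

-- ===== PRECONDITION & SPEC =====
-- Pre_ excludes exactly the inputs where Python A raises IndexError: some first occurrence of a
-- masked ID in [4096, 4121] sits at an index ≥ len(hSkinBoneIDList) (Python B raises there too).
def Pre_getAnimBoneMap (hAnimBoneIDList : List Int) (hSkinBoneIDList : List Int) : Prop :=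
  ∀ j : Nat, j < hAnimBoneIDList.length →
    (4096 ≤ pvMask (hAnimBoneIDList.getD j 0) ∧ pvMask (hAnimBoneIDList.getD j 0) ≤ 4121 ∧
      ∀ k : Nat, k < j → pvMask (hAnimBoneIDList.getD k 0) ≠ pvMask (hAnimBoneIDList.getD j 0)) →
    j < hSkinBoneIDList.length
instance (hAnimBoneIDList : List Int) (hSkinBoneIDList : List Int) : Decidable (Pre_getAnimBoneMap hAnimBoneIDList hSkinBoneIDList) := by unfold Pre_getAnimBoneMap; infer_instance

def pvWitness_getAnimBoneMap : List Int × List Int := ([4096, 70000, 4098], [7, 8, 9])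

def Spec_getAnimBoneMap (hAnimBoneIDList : List Int) (hSkinBoneIDList : List Int) (out : List Int) : Prop := out = getAnimBoneMap_alt hAnimBoneIDList hSkinBoneIDList
instance (hAnimBoneIDList : List Int) (hSkinBoneIDList : List Int) (out : List Int) : Decidable (Spec_getAnimBoneMap hAnimBoneIDList hSkinBoneIDList out) := by unfold Spec_getAnimBoneMap; infer_instance

-- ===== CLAIM (what is proved, stated in full; the proofs are below) =====
def Claim_equal_getAnimBoneMap : Prop := ∀ (hAnimBoneIDList : List Int) (hSkinBoneIDList : List Int), Dom_getAnimBoneMap hAnimBoneIDList hSkinBoneIDList → Pre_getAnimBoneMap hAnimBoneIDList hSkinBoneIDList → Spec_getAnimBoneMap hAnimBoneIDList hSkinBoneIDList (getAnimBoneMap hAnimBoneIDList hSkinBoneIDList)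

-- ===== LEMMAS AND PROOFS =====

-- A's outer loop as a filterMap
theorem pv_foldl_append (f : Nat → Option Int) (l : List Nat) (acc : List Int) :
    l.foldl (fun boneMap i => match f i with | some s => boneMap ++ [s] | none => boneMap) acc
      = acc ++ l.filterMap f := by
  induction l generalizing acc with
  | nil => simp
  | cons x xs ih =>
    simp only [List.foldl_cons, List.filterMap_cons]
    cases h : f x <;> simp [ih]

theorem pvScatter_length (skin : List Int) (l : List (Int × Int)) (slots : List (Option Int)) :
    (pvScatter skin slots l).length = slots.length := by
  induction l generalizing slots with
  | nil => simp [pvScatter]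
  | cons p rest ih =>
    obtain ⟨j, a⟩ := p
    simp only [pvScatter]
    split
    · rw [ih]; simp
    · exact ih slots

-- slot characterisation: after the scatter pass, slot i holds the first-match value for ID 4096+i
theorem pvScatter_getD (skin : List Int) (l : List (Int × Int)) (slots : List (Option Int))
    (hlen : slots.length = 26) (i : Nat) (hi : i < 26) :
    (pvScatter skin slots l).getD i none =
      match slots.getD i none with
      | some s => some s
      | none => pvInnerA skin (4096 + (i : Int)) l := by
  induction l generalizing slots with
  | nil => simp only [pvScatter, pvInnerA]; cases slots.getD i none <;> simp
  | cons p rest ih =>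
    obtain ⟨j, a⟩ := p
    simp only [pvScatter, pvInnerA]
    split
    · rename_i hc
      obtain ⟨h1, h2, h3⟩ := hc
      rw [ih _ (by simp [hlen])]
      by_cases hie : i = (pvMask a - 4096).toNat
      · subst hie
        have hm : pvMask a = 4096 + (((pvMask a - 4096).toNat : Nat) : Int) := by omega
        have hset : (slots.set (pvMask a - 4096).toNat
            (some (PySem.List.pyGetD skin j 0))).getD (pvMask a - 4096).toNat none
            = some (PySem.List.pyGetD skin j 0) := by
          rw [List.getD_eq_getElem?_getD, List.getElem?_set_self (by rw [hlen]; omega)]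
          rfl
        rw [hset, h3, ← hm]
        simp
      · have hne : pvMask a ≠ 4096 + (i : Int) := by omega
        have hset : (slots.set (pvMask a - 4096).toNat
            (some (PySem.List.pyGetD skin j 0))).getD i none = slots.getD i none := by
          rw [List.getD_eq_getElem?_getD, List.getElem?_set_ne (by omega),
            ← List.getD_eq_getElem?_getD]
        rw [hset]
        cases slots.getD i none with
        | some s => rfl
        | none => rw [if_neg hne]
    · rename_i hc
      rw [ih _ hlen]
      cases hs : slots.getD i none with
      | some s => rfl
      | none =>
        have hne : pvMask a ≠ 4096 + (i : Int) := by
          intro hm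
          apply hc
          refine ⟨by omega, by omega, ?_⟩
          have ht : (pvMask a - 4096).toNat = i := by omega
          rw [ht, hs]
        rw [if_neg hne]

theorem pvScatter_eq_map (skin : List Int) (l : List (Int × Int)) :
    pvScatter skin (List.replicate 26 none) l
      = (List.range 26).map (fun (i : Nat) => pvInnerA skin (4096 + (i : Int)) l) := by
  apply List.ext_getElem
  · rw [pvScatter_length]; simp
  · intro i h1 h2
    rw [List.length_map, List.length_range] at h2
    have key := pvScatter_getD skin l (List.replicate 26 none) (by simp) i h2
    have hr : (List.replicate 26 (none : Option Int)).getD i none = none := by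
      rw [List.getD_eq_getElem?_getD, List.getElem?_replicate, if_pos h2, Option.getD_some]
    rw [hr] at key
    rw [List.getD_eq_getElem?_getD, List.getElem?_eq_getElem h1, Option.getD_some] at key
    rw [List.getElem_map, List.getElem_range]
    exact key

-- ===== VERDICT (by name: the statement is the Claim_ definition above) =====
theorem getAnimBoneMap_spec : Claim_equal_getAnimBoneMap := by
  intro anim skin _ _
  unfold Spec_getAnimBoneMap getAnimBoneMap getAnimBoneMap_alt
  rw [pv_foldl_append, pvScatter_eq_map]
  simp [List.filterMap_map]
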